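-- pv_equiv track=rewrite | github.com/chaudhary-keshav/codetrellis-matrix | codetrellis/pydantic_parser_enhanced.py | _extract_class_body
-- ===== SOURCE A (Python) =====
-- from typing import List, Optional, Dict, Any
--
-- def _extract_class_body(content: str, start_pos: int) -> Optional[str]:
--     """Extract the body of a class from start_pos (after the colon)."""
--     lines = content[start_pos:].split('\n')
--
--     if not lines:
--         return None
--
--     body_lines = []
--     base_indent = None
--
--     for line in lines:
--         if not line.strip():
--             if base_indent is not None:
--                 body_lines.append('')
--             continue
--
--         # Calculate indentation
--         stripped = line.lstrip()
--         indent = len(line) - len(stripped)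
--
--         if base_indent is None:
--             if stripped:
--                 base_indent = indent
--                 body_lines.append(line)
--         else:
--             if indent >= base_indent:
--                 body_lines.append(line)
--             else:
--                 # End of class body
--                 break
--
--     return '\n'.join(body_lines)
-- ===== SOURCE B (Python) =====
-- def _extract_class_body(content: str, start_pos: int):
--     """Index-table formulation: build a table of (index, indent) for non-blank
--     lines once, then compute the body region [first, end) arithmetically and
--     slice it out -- no sequential state, no break."""
--     lines = content[start_pos:].split('\n')
--     marked = [(i, len(l) - len(l.lstrip())) for i, l in enumerate(lines) if l.strip()]
--     if not marked:
--         return ''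
--     first, base = marked[0]
--     stops = [i for i, d in marked if d < base]
--     end = stops[0] if stops else len(lines)
--     return '\n'.join(l if l.strip() else '' for l in lines[first:end])
-- ===== Notes on version B (the rewrite author's own statement) =====
-- stated objective: alternative
-- what changed: Replaces A's single stateful break-loop (carrying body_lines and an Optional base_indent) by an index-table formulation: one comprehension builds a table of (index, indent) for the non-blank lines, the body region [first, end) is then computed arithmetically from that table, and the answer is a slice of the lines with blanks mapped to ''.
import Mathlib
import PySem

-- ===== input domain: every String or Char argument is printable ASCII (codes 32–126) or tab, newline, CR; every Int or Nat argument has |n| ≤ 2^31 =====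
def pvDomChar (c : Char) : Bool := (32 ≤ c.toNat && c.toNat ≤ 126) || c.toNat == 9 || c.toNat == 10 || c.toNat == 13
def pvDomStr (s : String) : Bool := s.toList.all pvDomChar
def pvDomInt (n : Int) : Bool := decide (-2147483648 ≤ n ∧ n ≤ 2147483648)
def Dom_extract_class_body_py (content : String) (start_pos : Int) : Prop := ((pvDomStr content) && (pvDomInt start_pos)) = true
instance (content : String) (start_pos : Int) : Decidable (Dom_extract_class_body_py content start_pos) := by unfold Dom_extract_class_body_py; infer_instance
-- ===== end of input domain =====

-- B replaces A's stateful break-loop by an index-table computation; equal return values everywhere (no mutation in either).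

-- ===== PORT A =====
-- the for-loop of A: state = (accumulated body_lines, base_indent : Option Int); break returns acc
def pvALoop : List (List Char) → List (List Char) → Option Int → List (List Char)
  | [], acc, _ => acc
  | line :: rest, acc, base? =>
    if PySem.Chars.strip line = [] then
      match base? with
      | some _ => pvALoop rest (acc ++ [[]]) base?
      | none => pvALoop rest acc base?
    else
      let stripped := PySem.Chars.lstrip line
      let indent : Int := PySem.Chars.len line - PySem.Chars.len stripped
      match base? with
      | none =>
        if stripped ≠ [] then pvALoop rest (acc ++ [line]) (some indent)
        else pvALoop rest acc none
      | some b =>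
        if indent ≥ b then pvALoop rest (acc ++ [line]) base? else acc

def extract_class_body_py (content : String) (start_pos : Int) : Option String :=
  let lines := PySem.Chars.splitOn (PySem.List.slice content.toList (some start_pos) none) ['\n']
  if lines = [] then none
  else some (String.ofList (PySem.Chars.join ['\n'] (pvALoop lines [] none)))

-- ===== PORT B =====
-- marked = [(i, indent(l)) for i, l in enumerate(lines) if l.strip()]
-- then first/base from marked[0], end = first stop index (or len(lines)), answer = blank-mapped slice lines[first:end]
def extract_class_body_py_alt (content : String) (start_pos : Int) : Option String :=
  let lines := PySem.Chars.splitOn (PySem.List.slice content.toList (some start_pos) none) ['\n']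
  let marked := (PySem.List.enumerate lines 0).filterMap
      (fun p => if PySem.Chars.strip p.2 = [] then none
                else some (p.1, (PySem.Chars.len p.2 - PySem.Chars.len (PySem.Chars.lstrip p.2) : Int)))
  match marked with
  | [] => some ""
  | (first, base) :: _ =>
    let stops := marked.filterMap (fun p => if p.2 < base then some p.1 else none)
    let e : Int := match stops with | [] => (lines.length : Int) | i :: _ => i
    some (String.ofList (PySem.Chars.join ['\n']
      ((PySem.List.slice lines (some first) (some e)).map
        (fun l => if PySem.Chars.strip l = [] then [] else l))))

-- ===== PRECONDITION & SPEC =====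
def Spec_extract_class_body_py (content : String) (start_pos : Int) (out : Option String) : Prop := out = extract_class_body_py_alt content start_pos
instance (content : String) (start_pos : Int) (out : Option String) : Decidable (Spec_extract_class_body_py content start_pos out) := by unfold Spec_extract_class_body_py; infer_instance

-- ===== CLAIM (what is proved, stated in full; the proofs are below) =====
def Claim_equal_extract_class_body_py : Prop := ∀ (content : String) (start_pos : Int), Dom_extract_class_body_py content start_pos → Spec_extract_class_body_py content start_pos (extract_class_body_py content start_pos)

-- ===== LEMMAS AND PROOFS =====

-- proof-only reformulation of A's loop: skip leading blanks, then a break-free body loop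
def pvSkipBlanks : List (List Char) → List (List Char)
  | [] => []
  | l :: rest => if PySem.Chars.strip l = [] then pvSkipBlanks rest else l :: rest

def pvBLoop (base : Int) : List (List Char) → List (List Char)
  | [] => []
  | l :: rest =>
    if PySem.Chars.strip l = [] then [] :: pvBLoop base rest
    else if (PySem.Chars.len l - PySem.Chars.len (PySem.Chars.lstrip l) : Int) ≥ base then
      l :: pvBLoop base rest
    else []

theorem pvALoop_some (lines : List (List Char)) : ∀ (acc : List (List Char)) (b : Int),
    pvALoop lines acc (some b) = acc ++ pvBLoop b lines := by
  induction lines with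
  | nil => intro acc b; simp [pvALoop, pvBLoop]
  | cons l rest ih =>
    intro acc b
    by_cases h : PySem.Chars.strip l = []
    · simp [pvALoop, pvBLoop, h, ih]
    · simp only [pvALoop, pvBLoop, if_neg h]
      split_ifs with h2 <;> simp [ih]

theorem pvLstrip_ne_of_strip_ne (l : List Char) (h : PySem.Chars.strip l ≠ []) :
    PySem.Chars.lstrip l ≠ [] := by
  intro hl
  apply h
  simp [PySem.Chars.strip, hl, PySem.Chars.rstrip]

theorem pvALoop_none (lines : List (List Char)) :
    pvALoop lines [] none =
      match pvSkipBlanks lines with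
      | [] => []
      | first :: rest =>
          first :: pvBLoop (PySem.Chars.len first - PySem.Chars.len (PySem.Chars.lstrip first)) rest := by
  induction lines with
  | nil => simp [pvALoop, pvSkipBlanks]
  | cons l rest ih =>
    by_cases h : PySem.Chars.strip l = []
    · simpa [pvALoop, pvSkipBlanks, h] using ih
    · have hl := pvLstrip_ne_of_strip_ne l h
      simp [pvALoop, pvSkipBlanks, h, hl, pvALoop_some]

theorem pvSplitOnGo_ne_nil (sep : List Char) (fuel : Nat) : ∀ (l cur : List Char) (acc : List (List Char)), PySem.Chars.splitOn.go sep fuel l cur acc ≠ [] := by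
  induction fuel with
  | zero => intro l cur acc; simp [PySem.Chars.splitOn.go]
  | succ n ih =>
    intro l cur acc
    cases l with
    | nil => simp [PySem.Chars.splitOn.go]
    | cons c rest =>
      rw [PySem.Chars.splitOn.go]
      split_ifs with h
      · exact ih _ _ _
      · exact ih _ _ _

theorem pvSplitOn_ne_nil (cs : List Char) : PySem.Chars.splitOn cs ['\n'] ≠ [] :=
  pvSplitOnGo_ne_nil _ _ _ _ _

-- abbreviations for the proofs
def pvInd (l : List Char) : Int := PySem.Chars.len l - PySem.Chars.len (PySem.Chars.lstrip l)
def pvMarkF (p : Int × List Char) : Option (Int × Int) :=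
  if PySem.Chars.strip p.2 = [] then none else some (p.1, pvInd p.2)
def pvStopF (base : Int) (p : Int × List Char) : Option Int :=
  if PySem.Chars.strip p.2 = [] then none else if pvInd p.2 < base then some p.1 else none
def pvBlankify (l : List Char) : List Char := if PySem.Chars.strip l = [] then [] else l

-- stops of B, expressed directly over enumerate
theorem pvStops_eq (base : Int) (xs : List (Int × List Char)) :
    (xs.filterMap pvMarkF).filterMap (fun p => if p.2 < base then some p.1 else none)
      = xs.filterMap (pvStopF base) := by
  rw [List.filterMap_filterMap]
  apply List.filterMap_congr
  intro p _
  unfold pvMarkF pvStopF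
  split_ifs <;> simp_all

-- every stop index is ≥ the enumeration offset
theorem pvStop_ge (base : Int) (rest : List (List Char)) (k i : Int)
    (h : i ∈ (PySem.List.enumerate rest k).filterMap (pvStopF base)) : k ≤ i := by
  rcases List.mem_filterMap.mp h with ⟨p, hp, hpi⟩
  rcases (PySem.List.mem_enumerate_iff _ _ _).mp hp with ⟨j, hj, rfl⟩
  unfold pvStopF at hpi
  split_ifs at hpi; simp_all
  omega

-- the break-free body loop = take-to-first-stop, blanks mapped to []
theorem pvBLoop_take (rest : List (List Char)) : ∀ (k base : Int),
    pvBLoop base rest =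
      (rest.take (match (PySem.List.enumerate rest k).filterMap (pvStopF base) with
                  | [] => rest.length
                  | i :: _ => (i - k).toNat)).map pvBlankify := by
  induction rest with
  | nil => intro k base; simp [pvBLoop]
  | cons l rs ih =>
    intro k base
    rw [PySem.List.enumerate_cons]
    by_cases hb : PySem.Chars.strip l = []
    · have hf : pvStopF base (k, l) = none := by simp [pvStopF, hb]
      rw [List.filterMap_cons_none hf]
      cases hs : (PySem.List.enumerate rs (k+1)).filterMap (pvStopF base) with
      | nil =>
        simp only [pvBLoop, if_pos hb]
        rw [ih (k+1) base, hs]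
        simp [pvBlankify, hb]
      | cons i is =>
        have hge : k + 1 ≤ i := pvStop_ge base rs (k+1) i (by rw [hs]; exact List.mem_cons_self)
        have : (i - k).toNat = (i - (k+1)).toNat + 1 := by omega
        rw [show (match i :: is with | [] => (l::rs).length | i::_ => (i-k).toNat) = (i-k).toNat from rfl, this]
        simp only [pvBLoop, if_pos hb, List.take_succ_cons, List.map_cons]
        rw [ih (k+1) base, hs]
        simp [pvBlankify, hb]
    · by_cases hlt : pvInd l < base
      · have hf : pvStopF base (k, l) = some k := by simp [pvStopF, hb, hlt]
        rw [List.filterMap_cons_some hf]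
        simp only [Int.sub_self, Int.toNat_zero, List.take_zero, List.map_nil]
        simp only [pvBLoop, if_neg hb]
        rw [if_neg (by unfold pvInd at hlt; omega)]
      · have hf : pvStopF base (k, l) = none := by simp [pvStopF, hb, hlt]
        rw [List.filterMap_cons_none hf]
        cases hs : (PySem.List.enumerate rs (k+1)).filterMap (pvStopF base) with
        | nil =>
          simp only [pvBLoop, if_neg hb]
          rw [if_pos (by unfold pvInd at hlt; omega)]
          rw [ih (k+1) base, hs]
          simp [pvBlankify, hb]
        | cons i is =>
          have hge : k + 1 ≤ i := pvStop_ge base rs (k+1) i (by rw [hs]; exact List.mem_cons_self)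
          have : (i - k).toNat = (i - (k+1)).toNat + 1 := by omega
          rw [show (match i :: is with | [] => (l::rs).length | i::_ => (i-k).toNat) = (i-k).toNat from rfl, this]
          simp only [pvBLoop, if_neg hb]
          rw [if_pos (by unfold pvInd at hlt; omega)]
          simp only [List.take_succ_cons, List.map_cons]
          rw [ih (k+1) base, hs]
          simp [pvBlankify, hb]

-- skipBlanks decomposition: lines = blanks ++ skipBlanks lines
theorem pvSkipBlanks_decomp (lines : List (List Char)) :
    ∃ bs, lines = bs ++ pvSkipBlanks lines ∧ ∀ l ∈ bs, PySem.Chars.strip l = [] := by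
  induction lines with
  | nil => exact ⟨[], by simp [pvSkipBlanks]⟩
  | cons l rest ih =>
    by_cases h : PySem.Chars.strip l = []
    · rcases ih with ⟨bs, hb, hall⟩
      exact ⟨l :: bs, by simp [pvSkipBlanks, h, ← hb], by
        intro x hx; rcases List.mem_cons.mp hx with rfl | hx
        · exact h
        · exact hall x hx⟩
    · exact ⟨[], by simp [pvSkipBlanks, h]⟩

theorem pvMark_blanks_nil (bs : List (List Char)) (s : Int)
    (h : ∀ l ∈ bs, PySem.Chars.strip l = []) :
    (PySem.List.enumerate bs s).filterMap pvMarkF = [] := by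
  induction bs generalizing s with
  | nil => simp
  | cons l rest ih =>
    rw [PySem.List.enumerate_cons]
    rw [List.filterMap_cons_none (by simp [pvMarkF, h l List.mem_cons_self])]
    exact ih (s+1) (fun x hx => h x (List.mem_cons_of_mem _ hx))

theorem pvSkipBlanks_head (lines : List (List Char)) (first : List Char) (rest : List (List Char))
    (h : pvSkipBlanks lines = first :: rest) : PySem.Chars.strip first ≠ [] := by
  induction lines with
  | nil => simp [pvSkipBlanks] at h
  | cons l ls ih =>
    by_cases hb : PySem.Chars.strip l = []
    · exact ih (by simpa [pvSkipBlanks, hb] using h)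
    · simp only [pvSkipBlanks, if_neg hb, List.cons.injEq] at h
      rw [← h.1]; exact hb

-- ===== VERDICT (by name: the statement is the Claim_ definition above) =====
theorem extract_class_body_py_spec : Claim_equal_extract_class_body_py := by
  intro content start_pos _
  unfold Spec_extract_class_body_py extract_class_body_py extract_class_body_py_alt
  rw [if_neg (pvSplitOn_ne_nil _), pvALoop_none]
  set lines := PySem.Chars.splitOn (PySem.List.slice content.toList (some start_pos) none) ['\n'] with hlines
  rcases pvSkipBlanks_decomp lines with ⟨bs, hdec, hall⟩
  cases hs : pvSkipBlanks lines with
  | nil =>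
    rw [hs] at hdec
    have : (PySem.List.enumerate lines 0).filterMap pvMarkF = [] := by
      rw [hdec]; simpa using pvMark_blanks_nil bs 0 hall
    simp only [show (fun (p : Int × List Char) => if PySem.Chars.strip p.2 = [] then none
        else some (p.1, (PySem.Chars.len p.2 - PySem.Chars.len (PySem.Chars.lstrip p.2) : Int))) = pvMarkF from rfl]
    rw [this]
    simp [PySem.Chars.join, List.intercalate]
  | cons first rest =>
    have hfirst := pvSkipBlanks_head lines first rest hs
    rw [hs] at hdec
    simp only [show (fun (p : Int × List Char) => if PySem.Chars.strip p.2 = [] then none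
        else some (p.1, (PySem.Chars.len p.2 - PySem.Chars.len (PySem.Chars.lstrip p.2) : Int))) = pvMarkF from rfl,
      show (fun (l : List Char) => if PySem.Chars.strip l = [] then ([] : List Char) else l) = pvBlankify from rfl,
      show PySem.Chars.len first - PySem.Chars.len (PySem.Chars.lstrip first) = pvInd first from rfl]
    have hmarked : (PySem.List.enumerate lines 0).filterMap pvMarkF
        = ((bs.length : Int), pvInd first) :: (PySem.List.enumerate rest ((bs.length : Int) + 1)).filterMap pvMarkF := by
      rw [hdec, PySem.List.enumerate_append, List.filterMap_append,
          pvMark_blanks_nil bs 0 hall, List.nil_append, PySem.List.enumerate_cons,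
          List.filterMap_cons_some (show pvMarkF (0 + (bs.length:Int), first) = some (0 + (bs.length:Int), pvInd first) from by
            simp [pvMarkF, hfirst])]
      norm_num
    rw [hmarked]
    simp only [List.filterMap_cons]
    rw [show (if (pvInd first) < (pvInd first) then some ((bs.length : Int)) else none) = (none : Option Int) from by simp]
    rw [pvStops_eq]
    have hlen : lines.length = bs.length + (rest.length + 1) := by simp [hdec]
    have hdrop : lines.drop bs.length = first :: rest := by rw [hdec, List.drop_left]
    cases hstops : (PySem.List.enumerate rest ((bs.length:Int) + 1)).filterMap (pvStopF (pvInd first)) with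
    | nil =>
      have hb : pvBLoop (pvInd first) rest = rest.map pvBlankify := by
        rw [pvBLoop_take rest ((bs.length:Int)+1) (pvInd first), hstops]; simp
      have hslice : PySem.List.slice lines (some (bs.length:Int)) (some (lines.length:Int)) = first :: rest := by
        rw [PySem.List.slice_natCast, hdrop]
        rw [show lines.length - bs.length = rest.length + 1 from by omega]
        simp
      simp only [hslice, hb, List.map_cons]
      rw [show pvBlankify first = first from by simp [pvBlankify, hfirst]]
    | cons i is =>
      have hge : (bs.length:Int) + 1 ≤ i :=
        pvStop_ge (pvInd first) rest ((bs.length:Int)+1) i (by rw [hstops]; exact List.mem_cons_self)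
      have hb : pvBLoop (pvInd first) rest = (rest.take (i - ((bs.length:Int)+1)).toNat).map pvBlankify := by
        rw [pvBLoop_take rest ((bs.length:Int)+1) (pvInd first), hstops]
      have hslice : PySem.List.slice lines (some (bs.length:Int)) (some i)
          = first :: rest.take (i - ((bs.length:Int)+1)).toNat := by
        rw [PySem.List.slice_toNat lines (by positivity) (by omega)]
        rw [show ((bs.length:Int)).toNat = bs.length from by omega, hdrop]
        rw [show i.toNat - bs.length = (i - ((bs.length:Int)+1)).toNat + 1 from by omega]
        simp
      simp only [hslice, List.map_cons, hb]
      rw [show pvBlankify first = first from by simp [pvBlankify, hfirst]]
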